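-- pv_equiv track=rewrite | github.com/gaestu/SurfSifter | src/extractors/browser/safari/cache/_image_carver.py | _filename_matches_entry
-- ===== SOURCE A (Python) =====
-- from typing import List, Optional, Set
--
-- def _filename_matches_entry(filename: str, entry_ids: Set[int]) -> bool:
--     for entry_id in entry_ids:
--         if filename == str(entry_id):
--             return True
--         if filename.lower() == f"{entry_id:x}":
--             return True
--         if filename.lower() == f"{entry_id:08x}":
--             return True
--     return False
-- ===== SOURCE B (Python) =====
-- # B: instead of looping over entry_ids and formatting each id three ways,
-- # parse filename into at most two candidate integers (strict decimal, strict
-- # lowercase hex re-checked against Python's canonical formatting) and test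
-- # those candidates for membership in entry_ids.
--
-- def _dec_value(s):
--     # strict hand-rolled decimal parse: optional '-', then one or more ASCII digits
--     neg = s.startswith('-')
--     t = s[1:] if neg else s
--     if not t:
--         return None
--     v = 0
--     for c in t:
--         if not ('0' <= c <= '9'):
--             return None
--         v = v * 10 + (ord(c) - 48)
--     return -v if neg else v
--
--
-- def _hex_value(s):
--     # strict hand-rolled hex parse: optional '-', then one or more of 0-9a-f
--     neg = s.startswith('-')
--     t = s[1:] if neg else s
--     if not t:
--         return None
--     v = 0
--     for c in t:
--         if '0' <= c <= '9':
--             d = ord(c) - 48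
--         elif 'a' <= c <= 'f':
--             d = ord(c) - 87
--         else:
--             return None
--         v = v * 16 + d
--     return -v if neg else v
--
--
-- def _filename_matches_entry(filename, entry_ids):
--     lf = filename.lower()
--     candidates = []
--     v = _dec_value(filename)
--     if v is not None and str(v) == filename:
--         candidates.append(v)
--     h = _hex_value(lf)
--     if h is not None and (f"{h:x}" == lf or f"{h:08x}" == lf):
--         candidates.append(h)
--     return any(c in entry_ids for c in candidates)
-- ===== Notes on version B (the rewrite author's own statement) =====
-- stated objective: faster
-- what changed: Instead of iterating over entry_ids and formatting every id as decimal, hex and zero-padded hex, B parses the filename once into at most two canonical integer candidates (strict decimal and strict lowercase hex re-checked against the canonical formatting) and tests only those candidates for set membership, so no loop over entry_ids remains.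
import Mathlib
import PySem

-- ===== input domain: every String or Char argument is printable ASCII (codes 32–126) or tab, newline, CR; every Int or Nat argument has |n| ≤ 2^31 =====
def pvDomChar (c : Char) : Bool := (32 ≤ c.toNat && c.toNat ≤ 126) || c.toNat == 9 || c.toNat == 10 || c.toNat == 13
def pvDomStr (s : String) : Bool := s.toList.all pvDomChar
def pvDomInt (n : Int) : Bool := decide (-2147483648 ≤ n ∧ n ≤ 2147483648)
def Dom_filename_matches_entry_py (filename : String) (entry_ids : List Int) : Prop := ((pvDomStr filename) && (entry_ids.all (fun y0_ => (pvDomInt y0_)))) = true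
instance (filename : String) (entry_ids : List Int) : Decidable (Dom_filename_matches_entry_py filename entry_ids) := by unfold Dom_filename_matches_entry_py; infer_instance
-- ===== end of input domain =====

-- B replaces A's scan over entry_ids (formatting each id three ways) by parsing the
-- filename once into at most two candidate integers and testing those for membership.

-- ===== PORT A =====

-- hand port of Python's f"{n:x}" (no PySem primitive): lowercase hex digits of |n|,
-- '-' first for negatives; exact for all ints.
def pyHexChars (n : Nat) : List Char :=
  if h : n / 16 = 0 then [Nat.digitChar (n % 16)]
  else pyHexChars (n / 16) ++ [Nat.digitChar (n % 16)]
decreasing_by omega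

def pyHex (n : Int) : String :=
  if n < 0 then String.ofList ('-' :: pyHexChars n.natAbs)
  else String.ofList (pyHexChars n.toNat)

-- hand port of Python's f"{n:08x}": zero-pad to total width 8 (the sign counts
-- towards the width); exact for all ints.
def pyPadZeros (w : Nat) (l : List Char) : List Char := List.replicate (w - l.length) '0' ++ l

def pyHex8 (n : Int) : String :=
  if n < 0 then String.ofList ('-' :: pyPadZeros 7 (pyHexChars n.natAbs))
  else String.ofList (pyPadZeros 8 (pyHexChars n.toNat))

-- A's for-loop over entry_ids with its three early-return comparisons
def matchLoopA (filename : String) : List Int → Bool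
  | [] => false
  | e :: rest =>
    if filename == PySem.Int.toStr e then true
    else if PySem.Str.lower filename == pyHex e then true
    else if PySem.Str.lower filename == pyHex8 e then true
    else matchLoopA filename rest

def filename_matches_entry_py (filename : String) (entry_ids : List Int) : Bool :=
  matchLoopA filename entry_ids

-- ===== PORT B =====

-- Source B's digit loop of _dec_value: v = v*10 + (ord(c) - 48), None on a non-digit
def decLoopB : List Char → Nat → Option Nat
  | [], v => some v
  | c :: r, v =>
    if '0' ≤ c ∧ c ≤ '9' then decLoopB r (v * 10 + (c.toNat - 48)) else none

-- Source B's _dec_value, on the character list of s (startswith('-') / s[1:] = head/tail)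
def decValueB (s : String) : Option Int :=
  let cs := s.toList
  let neg := cs.head? == some '-'
  let t := if neg then cs.tail else cs
  if t = [] then none
  else match decLoopB t 0 with
       | some v => some (if neg then -(v : Int) else (v : Int))
       | none => none

-- Source B's digit loop of _hex_value: base 16, 'a'-'f' carry value ord(c)-87
def hexLoopB : List Char → Nat → Option Nat
  | [], v => some v
  | c :: r, v =>
    if '0' ≤ c ∧ c ≤ '9' then hexLoopB r (v * 16 + (c.toNat - 48))
    else if 'a' ≤ c ∧ c ≤ 'f' then hexLoopB r (v * 16 + (c.toNat - 87))
    else none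

-- Source B's _hex_value
def hexValueB (s : String) : Option Int :=
  let cs := s.toList
  let neg := cs.head? == some '-'
  let t := if neg then cs.tail else cs
  if t = [] then none
  else match hexLoopB t 0 with
       | some v => some (if neg then -(v : Int) else (v : Int))
       | none => none

def filename_matches_entry_py_alt (filename : String) (entry_ids : List Int) : Bool :=
  let lf := PySem.Str.lower filename
  let candidates : List Int :=
    (match decValueB filename with
     | some v => if PySem.Int.toStr v == filename then [v] else []
     | none => []) ++
    (match hexValueB lf with
     | some h => if pyHex h == lf || pyHex8 h == lf then [h] else []
     | none => [])
  candidates.any (fun c => entry_ids.contains c)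

-- ===== PRECONDITION & SPEC =====
def Spec_filename_matches_entry_py (filename : String) (entry_ids : List Int) (out : Bool) : Prop := out = filename_matches_entry_py_alt filename entry_ids
instance (filename : String) (entry_ids : List Int) (out : Bool) : Decidable (Spec_filename_matches_entry_py filename entry_ids out) := by unfold Spec_filename_matches_entry_py; infer_instance

-- ===== CLAIM (what is proved, stated in full; the proofs are below) =====
def Claim_equal_filename_matches_entry_py : Prop := ∀ (filename : String) (entry_ids : List Int), Dom_filename_matches_entry_py filename entry_ids → Spec_filename_matches_entry_py filename entry_ids (filename_matches_entry_py filename entry_ids)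

-- ===== LEMMAS AND PROOFS =====

-- my canonical decimal formatter, mirroring Nat.toDigitsCore's branch structure
def decChars (n : Nat) : List Char :=
  if h : n / 10 = 0 then [Nat.digitChar (n % 10)]
  else decChars (n / 10) ++ [Nat.digitChar (n % 10)]
decreasing_by omega

lemma toDigitsCore_eq_decChars (f : Nat) : ∀ (n : Nat) (acc : List Char), n < f →
    Nat.toDigitsCore 10 f n acc = decChars n ++ acc := by
  induction f with
  | zero => intro n acc h; omega
  | succ f ih =>
    intro n acc h
    rw [decChars]
    by_cases hd : n / 10 = 0
    · simp [Nat.toDigitsCore, hd]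
    · have h1 : n / 10 < f := by omega
      simp only [Nat.toDigitsCore, hd, if_false]
      rw [ih (n / 10) _ h1]
      simp

lemma toDigits_eq_decChars (n : Nat) : Nat.toDigits 10 n = decChars n := by
  rw [Nat.toDigits, toDigitsCore_eq_decChars (n + 1) n [] (by omega), List.append_nil]

lemma dec_digit_facts (d : Nat) (h : d < 10) :
    ('0' ≤ Nat.digitChar d ∧ Nat.digitChar d ≤ '9') ∧ (Nat.digitChar d).toNat - 48 = d := by
  interval_cases d <;> exact ⟨by decide, by decide⟩

lemma hex_digit_facts (d : Nat) (h : d < 16) :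
    (('0' ≤ Nat.digitChar d ∧ Nat.digitChar d ≤ '9') ∧ (Nat.digitChar d).toNat - 48 = d) ∨
    (¬('0' ≤ Nat.digitChar d ∧ Nat.digitChar d ≤ '9') ∧
      ('a' ≤ Nat.digitChar d ∧ Nat.digitChar d ≤ 'f') ∧ (Nat.digitChar d).toNat - 87 = d) := by
  interval_cases d
  all_goals first
    | exact Or.inl ⟨by decide, by decide⟩
    | exact Or.inr ⟨by decide, by decide, by decide⟩

lemma decChars_ne_nil (n : Nat) : decChars n ≠ [] := by
  rw [decChars]; split <;> simp

lemma hexChars_ne_nil (n : Nat) : pyHexChars n ≠ [] := by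
  rw [pyHexChars]; split <;> simp

lemma decChars_no_minus (n : Nat) : ∀ c ∈ decChars n, c ≠ '-' := by
  induction n using Nat.strong_induction_on with
  | _ n ih =>
    intro c hc
    rw [decChars] at hc
    have hd := (dec_digit_facts (n % 10) (by omega)).1
    split at hc
    · simp at hc; subst hc; intro h; rw [h] at hd; revert hd; decide
    · rename_i hne
      rcases List.mem_append.mp hc with h1 | h1
      · exact ih (n / 10) (by omega) c h1
      · simp at h1; subst h1; intro h; rw [h] at hd; revert hd; decide

lemma hexChars_no_minus (n : Nat) : ∀ c ∈ pyHexChars n, c ≠ '-' := by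
  induction n using Nat.strong_induction_on with
  | _ n ih =>
    intro c hc
    rw [pyHexChars] at hc
    have hd := hex_digit_facts (n % 16) (by omega)
    have hc' : c = Nat.digitChar (n % 16) → c ≠ '-' := by
      intro h; subst h
      rcases hd with ⟨⟨h1, h2⟩, _⟩ | ⟨_, ⟨h1, h2⟩, _⟩ <;>
        (intro h; rw [h] at h1 h2; revert h1 h2; decide)
    split at hc
    · simp at hc; exact hc' hc
    · rcases List.mem_append.mp hc with h1 | h1
      · exact ih (n / 16) (by omega) c h1
      · simp at h1; exact hc' h1

lemma decLoopB_append (l m : List Char) (v : Nat) :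
    decLoopB (l ++ m) v = match decLoopB l v with
      | some w => decLoopB m w
      | none => none := by
  induction l generalizing v with
  | nil => rfl
  | cons c r ih =>
    simp only [List.cons_append, decLoopB]
    split <;> simp [ih]

lemma hexLoopB_append (l m : List Char) (v : Nat) :
    hexLoopB (l ++ m) v = match hexLoopB l v with
      | some w => hexLoopB m w
      | none => none := by
  induction l generalizing v with
  | nil => rfl
  | cons c r ih =>
    simp only [List.cons_append, hexLoopB]
    split
    · simp [ih]
    · split <;> simp [ih]

lemma decLoopB_decChars (n : Nat) : ∀ v : Nat,
    decLoopB (decChars n) v = some (v * 10 ^ (decChars n).length + n) := by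
  induction n using Nat.strong_induction_on with
  | _ n ih =>
    intro v
    rw [decChars]
    obtain ⟨⟨hg1, hg2⟩, hval⟩ := dec_digit_facts (n % 10) (by omega)
    split
    · rename_i hd
      simp only [decLoopB, hg1, hg2, and_self, if_true, hval, List.length_singleton]
      have : n % 10 = n := by omega
      rw [this]; norm_num
    · rename_i hd
      rw [decLoopB_append, ih (n / 10) (by omega) v]
      simp only [decLoopB, hg1, hg2, and_self, if_true, hval, List.length_append,
        List.length_singleton]
      congr 1
      have h1 : (v * 10 ^ (decChars (n / 10)).length + n / 10) * 10 + n % 10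
          = v * (10 ^ (decChars (n / 10)).length * 10) + (n / 10 * 10 + n % 10) := by ring
      rw [h1, pow_succ]
      congr 1
      omega

lemma hexLoopB_hexChars (n : Nat) : ∀ v : Nat,
    hexLoopB (pyHexChars n) v = some (v * 16 ^ (pyHexChars n).length + n) := by
  induction n using Nat.strong_induction_on with
  | _ n ih =>
    intro v
    rw [pyHexChars]
    have hstep : ∀ w : Nat, hexLoopB [Nat.digitChar (n % 16)] w = some (w * 16 + n % 16) := by
      intro w
      rcases hex_digit_facts (n % 16) (by omega) with ⟨⟨h1, h2⟩, hval⟩ | ⟨hng, ⟨h1, h2⟩, hval⟩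
      · simp [hexLoopB, h1, h2, hval]
      · simp [hexLoopB, hng, h1, h2, hval]
    split
    · rename_i hd
      rw [hstep v]
      have : n % 16 = n := by omega
      rw [this]; norm_num
    · rename_i hd
      rw [hexLoopB_append, ih (n / 16) (by omega) v]
      show hexLoopB [Nat.digitChar (n % 16)] (v * 16 ^ (pyHexChars (n / 16)).length + n / 16)
        = _
      rw [hstep]
      congr 1
      simp only [List.length_append, List.length_singleton]
      have h1 : (v * 16 ^ (pyHexChars (n / 16)).length + n / 16) * 16 + n % 16
          = v * (16 ^ (pyHexChars (n / 16)).length * 16) + (n / 16 * 16 + n % 16) := by ring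
      rw [h1, pow_succ]
      congr 1
      omega

lemma hexLoopB_replicate_zero (k : Nat) (l : List Char) :
    hexLoopB (List.replicate k '0' ++ l) 0 = hexLoopB l 0 := by
  induction k with
  | zero => rfl
  | succ k ih => simpa [List.replicate_succ, hexLoopB] using ih

-- generic evaluator for decValueB/hexValueB on a '-'-free digit string
lemma head?_no_minus (l : List Char) (h : ∀ c ∈ l, c ≠ '-') : (l.head? == some '-') = false := by
  cases l with
  | nil => rfl
  | cons c r =>
    simp only [List.head?_cons]
    exact decide_eq_false (h c List.mem_cons_self)

lemma decValueB_pos (s : String) (n : Nat) (hs : s.toList = decChars n) :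
    decValueB s = some (n : Int) := by
  unfold decValueB
  simp only [hs, head?_no_minus _ (decChars_no_minus n), Bool.false_eq_true, if_false,
    if_neg (decChars_ne_nil n), decLoopB_decChars n 0]
  norm_num

lemma decValueB_neg (s : String) (n : Nat) (hs : s.toList = '-' :: decChars n) :
    decValueB s = some (-(n : Int)) := by
  unfold decValueB
  simp only [hs, List.head?_cons, beq_self_eq_true, if_true, List.tail_cons,
    if_neg (decChars_ne_nil n), decLoopB_decChars n 0]
  norm_num

lemma hexValueB_eval (s : String) (l : List Char) (n : Nat)
    (hs : s.toList = l) (hne : l ≠ []) (hnm : ∀ c ∈ l, c ≠ '-')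
    (hloop : hexLoopB l 0 = some n) : hexValueB s = some (n : Int) := by
  unfold hexValueB
  simp only [hs, head?_no_minus _ hnm, Bool.false_eq_true, if_false, if_neg hne, hloop]

lemma hexValueB_eval_neg (s : String) (l : List Char) (n : Nat)
    (hs : s.toList = '-' :: l) (hne : l ≠ [])
    (hloop : hexLoopB l 0 = some n) : hexValueB s = some (-(n : Int)) := by
  unfold hexValueB
  simp only [hs, List.head?_cons, beq_self_eq_true, if_true, List.tail_cons,
    if_neg hne, hloop]

-- the three roundtrips: B's parsers recover e from each of A's formatted strings
lemma decValueB_toStr (e : Int) : decValueB (PySem.Int.toStr e) = some e := by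
  by_cases he : e < 0
  · have : (PySem.Int.toStr e).toList = '-' :: decChars e.natAbs := by
      rw [PySem.Int.toList_toStr, PySem.Int.toChars, if_pos he, toDigits_eq_decChars]
    rw [decValueB_neg _ _ this]
    congr 1
    omega
  · have : (PySem.Int.toStr e).toList = decChars e.toNat := by
      rw [PySem.Int.toList_toStr, PySem.Int.toChars, if_neg he, toDigits_eq_decChars]
    rw [decValueB_pos _ _ this]
    congr 1
    omega

lemma hexValueB_pyHex (e : Int) : hexValueB (pyHex e) = some e := by
  unfold pyHex
  by_cases he : e < 0
  · rw [if_pos he]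
    rw [hexValueB_eval_neg _ (pyHexChars e.natAbs) e.natAbs String.toList_ofList
      (hexChars_ne_nil _) (by simpa using hexLoopB_hexChars e.natAbs 0)]
    congr 1
    omega
  · rw [if_neg he]
    rw [hexValueB_eval _ (pyHexChars e.toNat) e.toNat String.toList_ofList
      (hexChars_ne_nil _) (hexChars_no_minus _) (by simpa using hexLoopB_hexChars e.toNat 0)]
    congr 1
    omega

lemma hexLoopB_pad (k : Nat) (n : Nat) : hexLoopB (pyPadZeros k (pyHexChars n)) 0 = some n := by
  unfold pyPadZeros
  rw [hexLoopB_replicate_zero]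
  simpa using hexLoopB_hexChars n 0

lemma pad_ne_nil (k : Nat) (n : Nat) : pyPadZeros k (pyHexChars n) ≠ [] := by
  unfold pyPadZeros
  intro h
  rcases List.append_eq_nil_iff.mp h with ⟨_, h2⟩
  exact hexChars_ne_nil n h2

lemma pad_no_minus (k : Nat) (n : Nat) : ∀ c ∈ pyPadZeros k (pyHexChars n), c ≠ '-' := by
  intro c hc
  rcases List.mem_append.mp hc with h | h
  · have := List.eq_of_mem_replicate h
    subst this; decide
  · exact hexChars_no_minus n c h

lemma hexValueB_pyHex8 (e : Int) : hexValueB (pyHex8 e) = some e := by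
  unfold pyHex8
  by_cases he : e < 0
  · rw [if_pos he]
    rw [hexValueB_eval_neg _ _ e.natAbs String.toList_ofList (pad_ne_nil 7 _)
      (hexLoopB_pad 7 _)]
    congr 1
    omega
  · rw [if_neg he]
    rw [hexValueB_eval _ _ e.toNat String.toList_ofList (pad_ne_nil 8 _)
      (pad_no_minus 8 _) (hexLoopB_pad 8 _)]
    congr 1
    omega

-- characterization of A
lemma matchLoopA_iff (f : String) (l : List Int) :
    matchLoopA f l = true ↔ ∃ e ∈ l, f = PySem.Int.toStr e ∨
      PySem.Str.lower f = pyHex e ∨ PySem.Str.lower f = pyHex8 e := by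
  induction l with
  | nil => simp [matchLoopA]
  | cons e rest ih =>
    simp only [matchLoopA]
    by_cases h1 : f = PySem.Int.toStr e
    · simp [h1]
    · by_cases h2 : PySem.Str.lower f = pyHex e
      · simp [h2, beq_iff_eq]
      · by_cases h3 : PySem.Str.lower f = pyHex8 e
        · simp [h3, beq_iff_eq]
        · simp only [beq_iff_eq, if_neg h1, if_neg h2, if_neg h3, ih, List.mem_cons]
          constructor
          · rintro ⟨x, hx, hp⟩; exact ⟨x, Or.inr hx, hp⟩
          · rintro ⟨x, hx, hp⟩
            rcases hx with rfl | hx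
            · rcases hp with hp | hp | hp <;> [exact absurd hp h1; exact absurd hp h2;
                exact absurd hp h3]
            · exact ⟨x, hx, hp⟩

-- membership in B's candidate list characterizes the same three comparisons
lemma mem_candidates_iff (f : String) (e : Int) :
    (e ∈ ((match decValueB f with
            | some v => if PySem.Int.toStr v == f then [v] else []
            | none => []) ++
          (match hexValueB (PySem.Str.lower f) with
            | some h => if pyHex h == PySem.Str.lower f || pyHex8 h == PySem.Str.lower f
                        then [h] else []
            | none => []))) ↔
      (f = PySem.Int.toStr e ∨ PySem.Str.lower f = pyHex e ∨ PySem.Str.lower f = pyHex8 e) := by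
  rw [List.mem_append]
  constructor
  · rintro (h | h)
    · rcases hd : decValueB f with _ | v <;> rw [hd] at h
      · simp at h
      · by_cases hchk : (PySem.Int.toStr v == f) = true
        · simp only [hchk, if_true, List.mem_singleton] at h
          subst h
          exact Or.inl (beq_iff_eq.mp hchk).symm
        · simp [hchk] at h
    · rcases hh : hexValueB (PySem.Str.lower f) with _ | v <;> rw [hh] at h
      · simp at h
      · by_cases hchk : (pyHex v == PySem.Str.lower f || pyHex8 v == PySem.Str.lower f) = true
        · simp only [hchk, if_true, List.mem_singleton] at h
          subst h
          rcases Bool.or_eq_true_iff.mp hchk with hc | hc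
          · exact Or.inr (Or.inl (beq_iff_eq.mp hc).symm)
          · exact Or.inr (Or.inr (beq_iff_eq.mp hc).symm)
        · simp [hchk] at h
  · rintro (h | h | h)
    · left
      rw [h, decValueB_toStr e]
      simp [← h]
    · right
      rw [h, hexValueB_pyHex e]
      simp [← h]
    · right
      rw [h, hexValueB_pyHex8 e]
      simp [← h]

lemma alt_iff (f : String) (l : List Int) :
    filename_matches_entry_py_alt f l = true ↔ ∃ e ∈ l, f = PySem.Int.toStr e ∨
      PySem.Str.lower f = pyHex e ∨ PySem.Str.lower f = pyHex8 e := by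
  unfold filename_matches_entry_py_alt
  simp only [List.any_eq_true, List.contains_iff_mem]
  constructor
  · rintro ⟨c, hc, hmem⟩
    exact ⟨c, hmem, (mem_candidates_iff f c).mp hc⟩
  · rintro ⟨e, hel, hp⟩
    exact ⟨e, (mem_candidates_iff f e).mpr hp, hel⟩

-- ===== VERDICT (by name: the statement is the Claim_ definition above) =====
theorem filename_matches_entry_py_spec : Claim_equal_filename_matches_entry_py := by
  intro filename entry_ids _
  unfold Spec_filename_matches_entry_py filename_matches_entry_py
  rw [Bool.eq_iff_iff, matchLoopA_iff, alt_iff]
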